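-- pv_equiv track=rewrite | github.com/MonaliPanda17/kasparro_ai-kasparro-agentic-fb-analyst-monali-panda | src/agents/planner.py | _choose_kpis
-- ===== SOURCE A (Python) =====
-- from typing import List, Dict, Any, Tuple, Optional
--
-- def _choose_kpis(task: str, problem_type: str) -> List[str]:
--     """Choose KPIs based on problem type and task keywords."""
--     task_l = task.lower()
--     kpis: List[str] = []
--
--     # Problem-specific KPI selection
--     if problem_type == "roas_drop":
--         kpis.append("roas")  # Primary
--         kpis.append("revenue")  # To see if it's revenue or spend issue
--         kpis.append("cpa")  # Inverse of ROAS, helps diagnose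
--         if "spend" in task_l or "budget" in task_l:
--             # Add spend efficiency metrics
--             pass  # Already have ROAS/CPA
--
--     elif problem_type == "revenue_decline":
--         kpis.append("revenue")  # Primary
--         kpis.append("roas")  # Efficiency driver
--         kpis.append("cpa")  # Cost side
--
--     elif problem_type == "cpa_spike":
--         kpis.append("cpa")  # Primary
--         kpis.append("ctr")  # Funnel metric
--         kpis.append("cvr")  # Conversion side
--         kpis.append("roas")  # Overall efficiency
--
--     elif problem_type == "ctr_decline":
--         kpis.append("ctr")  # Primary
--         kpis.append("cvr")  # Funnel completeness
--         kpis.append("cpa")  # Impact on cost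
--
--     else:
--         # General: look at everything
--         kpis.append("roas")
--         kpis.append("revenue")
--
--     # Override with explicit mentions
--     explicit_kpis = []
--     if "roas" in task_l:
--         explicit_kpis.append("roas")
--     if any(x in task_l for x in ["revenue", "sales"]):
--         explicit_kpis.append("revenue")
--     if any(x in task_l for x in ["cpa", "cost per acquisition", "cost/purchase"]):
--         explicit_kpis.append("cpa")
--     if any(x in task_l for x in ["ctr", "click-through", "click through"]):
--         explicit_kpis.append("ctr")
--
--     # Prefer explicit, but merge intelligently
--     if explicit_kpis:
--         # Add explicit first, then problem-specific if not already there
--         result = explicit_kpis.copy()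
--         for kpi in kpis:
--             if kpi not in result:
--                 result.append(kpi)
--         kpis = result
--
--     # Remove duplicates while preserving order
--     seen = set()
--     ordered = []
--     for k in kpis:
--         if k not in seen:
--             ordered.append(k)
--             seen.add(k)
--
--     # Fallback if empty
--     if not ordered:
--         ordered = ["roas", "revenue"]
--
--     return ordered
-- ===== SOURCE B (Python) =====
-- from typing import List
--
-- _BASE = {
--     "roas_drop": ["roas", "revenue", "cpa"],
--     "revenue_decline": ["revenue", "roas", "cpa"],
--     "cpa_spike": ["cpa", "ctr", "cvr", "roas"],
--     "ctr_decline": ["ctr", "cvr", "cpa"],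
-- }
--
-- _KEYWORDS = [
--     ("roas", ("roas",)),
--     ("revenue", ("revenue", "sales")),
--     ("cpa", ("cpa", "cost per acquisition", "cost/purchase")),
--     ("ctr", ("ctr", "click-through", "click through")),
-- ]
--
-- def _choose_kpis(task: str, problem_type: str) -> List[str]:
--     """Choose KPIs by assigning every candidate KPI a priority rank and sorting:
--     explicitly mentioned KPIs get ranks 0..3 (keyword-table order), base KPIs for
--     the problem type get ranks 4+position unless already ranked; sorting the rank
--     map yields exactly 'explicit mentions first, then remaining base KPIs'."""
--     task_l = task.lower()
--     rank = {}
--     for i, (kpi, words) in enumerate(_KEYWORDS):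
--         if any(w in task_l for w in words):
--             rank[kpi] = i
--     for j, kpi in enumerate(_BASE.get(problem_type, ["roas", "revenue"])):
--         rank.setdefault(kpi, 4 + j)
--     return sorted(rank, key=rank.get)
-- ===== Notes on version B (the rewrite author's own statement) =====
-- stated objective: alternative
-- what changed: Instead of building lists by staged appends, a conditional merge loop and a seen-set dedup, B assigns every candidate KPI a numeric priority in one rank dict (explicit mentions get 0..3, base KPIs of the problem type get 4+position via setdefault) and returns the keys sorted by rank.
import Mathlib
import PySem

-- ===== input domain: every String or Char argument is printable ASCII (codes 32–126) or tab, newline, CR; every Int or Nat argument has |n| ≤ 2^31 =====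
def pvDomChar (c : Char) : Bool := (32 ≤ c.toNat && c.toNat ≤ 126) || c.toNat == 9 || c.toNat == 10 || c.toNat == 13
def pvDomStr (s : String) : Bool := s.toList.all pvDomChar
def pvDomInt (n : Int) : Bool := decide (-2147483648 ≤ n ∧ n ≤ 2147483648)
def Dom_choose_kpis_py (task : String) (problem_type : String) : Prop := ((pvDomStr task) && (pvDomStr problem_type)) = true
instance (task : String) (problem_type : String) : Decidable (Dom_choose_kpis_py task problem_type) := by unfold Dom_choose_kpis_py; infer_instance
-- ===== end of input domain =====

-- B computes the KPI list by ranking: each explicitly mentioned KPI gets rank 0..3, each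
-- base KPI of the problem type gets rank 4+position unless already ranked, and the rank
-- map is sorted by rank — replacing A's append/merge/dedup passes with a priority sort.

-- ===== PORT A =====
def choose_kpis_py (task : String) (problem_type : String) : List String :=
  let task_l := PySem.Str.lower task
  -- Problem-specific KPI selection (each append kept as ++ [·])
  let kpis : List String :=
    if problem_type == "roas_drop" then
      let kpis := ([] : List String) ++ ["roas"] ++ ["revenue"] ++ ["cpa"]
      if PySem.Str.isIn "spend" task_l || PySem.Str.isIn "budget" task_l then
        kpis  -- pass: already have ROAS/CPA
      else kpis
    else if problem_type == "revenue_decline" then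
      ([] : List String) ++ ["revenue"] ++ ["roas"] ++ ["cpa"]
    else if problem_type == "cpa_spike" then
      ([] : List String) ++ ["cpa"] ++ ["ctr"] ++ ["cvr"] ++ ["roas"]
    else if problem_type == "ctr_decline" then
      ([] : List String) ++ ["ctr"] ++ ["cvr"] ++ ["cpa"]
    else
      ([] : List String) ++ ["roas"] ++ ["revenue"]
  -- Override with explicit mentions
  let explicit_kpis : List String := []
  let explicit_kpis := if PySem.Str.isIn "roas" task_l then explicit_kpis ++ ["roas"] else explicit_kpis
  let explicit_kpis := if ["revenue", "sales"].any (fun x => PySem.Str.isIn x task_l) then explicit_kpis ++ ["revenue"] else explicit_kpis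
  let explicit_kpis := if ["cpa", "cost per acquisition", "cost/purchase"].any (fun x => PySem.Str.isIn x task_l) then explicit_kpis ++ ["cpa"] else explicit_kpis
  let explicit_kpis := if ["ctr", "click-through", "click through"].any (fun x => PySem.Str.isIn x task_l) then explicit_kpis ++ ["ctr"] else explicit_kpis
  -- Prefer explicit, but merge intelligently
  let kpis :=
    if explicit_kpis ≠ [] then
      kpis.foldl (fun result kpi => if result.contains kpi then result else result ++ [kpi]) explicit_kpis
    else kpis
  -- Remove duplicates while preserving order (seen : set, ordered : list)
  let st := kpis.foldl
      (fun (st : PySem.Set String × List String) k =>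
        if PySem.Set.contains st.1 k then st else (PySem.Set.add st.1 k, st.2 ++ [k]))
      (PySem.Set.empty, [])
  let ordered := st.2
  -- Fallback if empty
  if ordered = [] then ["roas", "revenue"] else ordered

-- ===== PORT B =====
def pvBaseKpis : PySem.Dict String (List String) :=
  PySem.Dict.ofList
    [("roas_drop", ["roas", "revenue", "cpa"]),
     ("revenue_decline", ["revenue", "roas", "cpa"]),
     ("cpa_spike", ["cpa", "ctr", "cvr", "roas"]),
     ("ctr_decline", ["ctr", "cvr", "cpa"])]

def pvKeywordTable : List (String × List String) :=
  [("roas", ["roas"]),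
   ("revenue", ["revenue", "sales"]),
   ("cpa", ["cpa", "cost per acquisition", "cost/purchase"]),
   ("ctr", ["ctr", "click-through", "click through"])]

def choose_kpis_py_alt (task : String) (problem_type : String) : List String :=
  let task_l := PySem.Str.lower task
  -- rank[kpi] = i for each explicitly mentioned kpi (table order)
  let rank : PySem.Dict String Int :=
    (PySem.List.enumerate pvKeywordTable).foldl
      (fun d p => if p.2.2.any (fun w => PySem.Str.isIn w task_l) then d.insert p.2.1 p.1 else d)
      PySem.Dict.empty
  -- rank.setdefault(kpi, 4 + j) for each base kpi
  let rank :=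
    (PySem.List.enumerate (pvBaseKpis.getD problem_type ["roas", "revenue"])).foldl
      (fun d p => d.setdefault p.2 (4 + p.1)) rank
  PySem.List.sorted rank.keys (fun k => rank.getD k 0) false

-- ===== PRECONDITION & SPEC =====
def Spec_choose_kpis_py (task : String) (problem_type : String) (out : List String) : Prop := out = choose_kpis_py_alt task problem_type
instance (task : String) (problem_type : String) (out : List String) : Decidable (Spec_choose_kpis_py task problem_type out) := by unfold Spec_choose_kpis_py; infer_instance

-- ===== CLAIM =====
def Claim_equal_choose_kpis_py : Prop := ∀ (task : String) (problem_type : String), Dom_choose_kpis_py task problem_type → Spec_choose_kpis_py task problem_type (choose_kpis_py task problem_type)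

-- ===== LEMMAS AND PROOFS =====

-- ===== VERDICT =====
set_option maxHeartbeats 1000000 in
theorem choose_kpis_py_spec : Claim_equal_choose_kpis_py := by
  intro task problem_type _
  unfold Spec_choose_kpis_py choose_kpis_py choose_kpis_py_alt pvKeywordTable
  simp only [PySem.List.enumerate_cons, PySem.List.enumerate_nil, List.foldl_cons, List.foldl_nil,
    List.any_cons, List.any_nil, Bool.or_false, ite_self]
  by_cases hp1 : problem_type = "roas_drop"
  · subst hp1
    cases h1 : PySem.Str.isIn "roas" (PySem.Str.lower task) <;>
    cases h2 : (PySem.Str.isIn "revenue" (PySem.Str.lower task) || PySem.Str.isIn "sales" (PySem.Str.lower task)) <;>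
    cases h3 : (PySem.Str.isIn "cpa" (PySem.Str.lower task) || (PySem.Str.isIn "cost per acquisition" (PySem.Str.lower task) || PySem.Str.isIn "cost/purchase" (PySem.Str.lower task))) <;>
    cases h4 : (PySem.Str.isIn "ctr" (PySem.Str.lower task) || (PySem.Str.isIn "click-through" (PySem.Str.lower task) || PySem.Str.isIn "click through" (PySem.Str.lower task))) <;>
    rfl
  by_cases hpRD : problem_type = "revenue_decline"
  · subst hpRD
    cases h1 : PySem.Str.isIn "roas" (PySem.Str.lower task) <;>
    cases h2 : (PySem.Str.isIn "revenue" (PySem.Str.lower task) || PySem.Str.isIn "sales" (PySem.Str.lower task)) <;>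
    cases h3 : (PySem.Str.isIn "cpa" (PySem.Str.lower task) || (PySem.Str.isIn "cost per acquisition" (PySem.Str.lower task) || PySem.Str.isIn "cost/purchase" (PySem.Str.lower task))) <;>
    cases h4 : (PySem.Str.isIn "ctr" (PySem.Str.lower task) || (PySem.Str.isIn "click-through" (PySem.Str.lower task) || PySem.Str.isIn "click through" (PySem.Str.lower task))) <;>
    rfl
  by_cases hpCS : problem_type = "cpa_spike"
  · subst hpCS
    cases h1 : PySem.Str.isIn "roas" (PySem.Str.lower task) <;>
    cases h2 : (PySem.Str.isIn "revenue" (PySem.Str.lower task) || PySem.Str.isIn "sales" (PySem.Str.lower task)) <;>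
    cases h3 : (PySem.Str.isIn "cpa" (PySem.Str.lower task) || (PySem.Str.isIn "cost per acquisition" (PySem.Str.lower task) || PySem.Str.isIn "cost/purchase" (PySem.Str.lower task))) <;>
    cases h4 : (PySem.Str.isIn "ctr" (PySem.Str.lower task) || (PySem.Str.isIn "click-through" (PySem.Str.lower task) || PySem.Str.isIn "click through" (PySem.Str.lower task))) <;>
    rfl
  by_cases hpCD : problem_type = "ctr_decline"
  · subst hpCD
    cases h1 : PySem.Str.isIn "roas" (PySem.Str.lower task) <;>
    cases h2 : (PySem.Str.isIn "revenue" (PySem.Str.lower task) || PySem.Str.isIn "sales" (PySem.Str.lower task)) <;>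
    cases h3 : (PySem.Str.isIn "cpa" (PySem.Str.lower task) || (PySem.Str.isIn "cost per acquisition" (PySem.Str.lower task) || PySem.Str.isIn "cost/purchase" (PySem.Str.lower task))) <;>
    cases h4 : (PySem.Str.isIn "ctr" (PySem.Str.lower task) || (PySem.Str.isIn "click-through" (PySem.Str.lower task) || PySem.Str.isIn "click through" (PySem.Str.lower task))) <;>
    rfl
  -- no problem type matched: the four == tests are false and the dict lookup returns the default
  have e1 : (problem_type == "roas_drop") = false := beq_eq_false_iff_ne.mpr hp1
  have e2 : (problem_type == "revenue_decline") = false := beq_eq_false_iff_ne.mpr hpRD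
  have e3 : (problem_type == "cpa_spike") = false := beq_eq_false_iff_ne.mpr hpCS
  have e4 : (problem_type == "ctr_decline") = false := beq_eq_false_iff_ne.mpr hpCD
  have eb : pvBaseKpis.getD problem_type ["roas", "revenue"] = ["roas", "revenue"] := by
    rw [show pvBaseKpis = PySem.Dict.mk
      [("roas_drop", ["roas", "revenue", "cpa"]),
       ("revenue_decline", ["revenue", "roas", "cpa"]),
       ("cpa_spike", ["cpa", "ctr", "cvr", "roas"]),
       ("ctr_decline", ["ctr", "cvr", "cpa"])] from rfl]
    simp [PySem.Dict.getD_eq_get?_getD,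
      beq_eq_false_iff_ne.mpr (Ne.symm hp1), beq_eq_false_iff_ne.mpr (Ne.symm hpRD),
      beq_eq_false_iff_ne.mpr (Ne.symm hpCS), beq_eq_false_iff_ne.mpr (Ne.symm hpCD), PySem.Dict.get?]
  rw [e1, e2, e3, e4, eb]
  cases h1 : PySem.Str.isIn "roas" (PySem.Str.lower task) <;>
  cases h2 : (PySem.Str.isIn "revenue" (PySem.Str.lower task) || PySem.Str.isIn "sales" (PySem.Str.lower task)) <;>
  cases h3 : (PySem.Str.isIn "cpa" (PySem.Str.lower task) || (PySem.Str.isIn "cost per acquisition" (PySem.Str.lower task) || PySem.Str.isIn "cost/purchase" (PySem.Str.lower task))) <;>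
  cases h4 : (PySem.Str.isIn "ctr" (PySem.Str.lower task) || (PySem.Str.isIn "click-through" (PySem.Str.lower task) || PySem.Str.isIn "click through" (PySem.Str.lower task))) <;>
  rfl
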